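-- pv_equiv track=rewrite | github.com/hpatel292-seneca/LeetCode-Solved-Problem | Medium/Answer a query/app.py | answer
-- ===== SOURCE A (Python) =====
-- def answer(nums, queries, limit):
--     prefix=[0]*len(nums)
--     for i in range(len(nums)):
--         prefix[i]=nums[i]+prefix[i-1]
--
--     res=[False]*len(queries)
--     for i in range(len(queries)):
--         if prefix[queries[i][1]] - prefix[queries[i][0]] + nums[queries[i][0]] <limit:
--             res[i]=True
--     return res
-- ===== SOURCE B (Python) =====
-- def prefix_sum(nums, i):
--     """Sum of nums up to and including index i (negative indices count from the end)."""
--     return sum(nums[:i]) + nums[i]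
--
-- def answer(nums, queries, limit):
--     return [prefix_sum(nums, q[1]) - (prefix_sum(nums, q[0]) - nums[q[0]]) < limit
--             for q in queries]
-- ===== Notes on version B (the rewrite author's own statement) =====
-- stated objective: simpler
-- what changed: Replaces the shared prefix-sum table and the preallocated True/False result array (filled by in-place sets under an index loop) with a one-line comprehension that answers each query on its own from a small prefix_sum helper (sum of a prefix slice plus the indexed element), recomputing the two prefix sums per query instead of building an index table once.
import Mathlib
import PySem

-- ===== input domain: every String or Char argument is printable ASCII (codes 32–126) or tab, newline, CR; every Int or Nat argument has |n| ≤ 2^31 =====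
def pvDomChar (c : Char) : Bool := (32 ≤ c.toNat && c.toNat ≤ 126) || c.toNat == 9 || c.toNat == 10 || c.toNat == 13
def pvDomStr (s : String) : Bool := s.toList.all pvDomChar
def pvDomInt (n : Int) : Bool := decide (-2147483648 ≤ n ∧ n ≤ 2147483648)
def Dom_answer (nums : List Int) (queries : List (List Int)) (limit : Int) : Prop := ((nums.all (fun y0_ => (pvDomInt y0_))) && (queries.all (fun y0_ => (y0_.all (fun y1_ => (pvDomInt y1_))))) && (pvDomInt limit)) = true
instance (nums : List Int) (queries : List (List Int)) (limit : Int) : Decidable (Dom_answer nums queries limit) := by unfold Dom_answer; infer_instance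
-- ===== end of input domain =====

-- B replaces the shared prefix-sum table and preallocated result array with a one-line
-- comprehension answering each query on its own from a prefix_sum helper (objective: simpler).

-- ===== PORT A =====
def answer (nums : List Int) (queries : List (List Int)) (limit : Int) : List Bool :=
  let pre := (PySem.List.pyRange 0 (nums.length : Int) 1).foldl
      (fun p i => PySem.List.pySetD p i (PySem.List.pyGetD nums i 0 + PySem.List.pyGetD p (i - 1) 0))
      (List.replicate nums.length (0 : Int))
  (PySem.List.pyRange 0 (queries.length : Int) 1).foldl
      (fun res i =>
        let q := PySem.List.pyGetD queries i []
        if PySem.List.pyGetD pre (PySem.List.pyGetD q 1 0) 0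
             - PySem.List.pyGetD pre (PySem.List.pyGetD q 0 0) 0
             + PySem.List.pyGetD nums (PySem.List.pyGetD q 0 0) 0 < limit
        then PySem.List.pySetD res i true
        else res)
      (List.replicate queries.length false)

-- ===== PORT B =====
-- helper prefix_sum(nums, i) = sum(nums[:i]) + nums[i]
def prefixSum (nums : List Int) (i : Int) : Int :=
  (PySem.List.slice nums none (some i)).sum + PySem.List.pyGetD nums i 0

def answer_alt (nums : List Int) (queries : List (List Int)) (limit : Int) : List Bool :=
  queries.map (fun q =>
    decide (prefixSum nums (PySem.List.pyGetD q 1 0)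
              - (prefixSum nums (PySem.List.pyGetD q 0 0)
                   - PySem.List.pyGetD nums (PySem.List.pyGetD q 0 0) 0) < limit))

-- ===== PRECONDITION & SPEC =====
-- Pre_ excludes exactly the inputs on which A raises IndexError: a query with fewer than
-- two entries, or a query index outside [-len(nums), len(nums)).
def Pre_answer (nums : List Int) (queries : List (List Int)) (limit : Int) : Prop :=
  ∀ q ∈ queries, 2 ≤ q.length
    ∧ -(nums.length : Int) ≤ q.getD 0 0 ∧ q.getD 0 0 < (nums.length : Int)
    ∧ -(nums.length : Int) ≤ q.getD 1 0 ∧ q.getD 1 0 < (nums.length : Int)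
instance (nums : List Int) (queries : List (List Int)) (limit : Int) : Decidable (Pre_answer nums queries limit) := by unfold Pre_answer; infer_instance

def pvWitness_answer : List Int × List (List Int) × Int := ([1, 2, 3], [[0, 1], [-1, 2]], 4)

def Spec_answer (nums : List Int) (queries : List (List Int)) (limit : Int) (out : List Bool) : Prop := out = answer_alt nums queries limit
instance (nums : List Int) (queries : List (List Int)) (limit : Int) (out : List Bool) : Decidable (Spec_answer nums queries limit out) := by unfold Spec_answer; infer_instance

-- ===== CLAIM =====
def Claim_equal_answer : Prop := ∀ (nums : List Int) (queries : List (List Int)) (limit : Int), Dom_answer nums queries limit → Pre_answer nums queries limit → Spec_answer nums queries limit (answer nums queries limit)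

-- ===== LEMMAS AND PROOFS =====

-- prefix-sum value: sum of the first k+1 elements
def pvS (nums : List Int) (k : Nat) : Int := (nums.take (k + 1)).sum

-- The prefix loop of A builds the prefix-sum table.
theorem answer_prefix_loop (nums : List Int) (m : Nat) (hm : m ≤ nums.length) :
    (PySem.List.pyRange 0 (m : Int) 1).foldl
      (fun p i => PySem.List.pySetD p i (PySem.List.pyGetD nums i 0 + PySem.List.pyGetD p (i - 1) 0))
      (List.replicate nums.length (0 : Int))
    = (List.range m).map (pvS nums) ++ List.replicate (nums.length - m) 0 := by
  induction m with
  | zero => simp [PySem.List.pyRange_one_eq_nil]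
  | succ k ih =>
    have hk : k ≤ nums.length := Nat.le_of_succ_le hm
    have hsplit : PySem.List.pyRange 0 ((k + 1 : Nat) : Int) 1
        = PySem.List.pyRange 0 (k : Nat) 1 ++ [(k : Int)] := by
      push_cast
      exact PySem.List.pyRange_one_succ_right (by positivity)
    rw [hsplit, List.foldl_append, ih hk]
    simp only [List.foldl_cons, List.foldl_nil]
    have hkn : k < nums.length := hm
    have h1 : PySem.List.pyGetD nums (k : Int) 0 = nums[k] := by
      simp [PySem.List.pyGetD_natCast, List.getD_eq_getElem?_getD, hkn]
    have h2 : PySem.List.pyGetD ((List.range k).map (pvS nums) ++ List.replicate (nums.length - k) 0) ((k : Int) - 1) 0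
        = if k = 0 then 0 else pvS nums (k - 1) := by
      cases k with
      | zero =>
        simp only [List.range_zero, List.map_nil, List.nil_append, Nat.cast_zero, zero_sub]
        rw [PySem.List.pyGetD_neg_one]
        · simp [List.getLast_replicate]
        · simp only [ne_eq, List.replicate_eq_nil_iff]
          omega
      | succ j =>
        have : ((j + 1 : Nat) : Int) - 1 = (j : Int) := by push_cast; ring
        rw [this, PySem.List.pyGetD_natCast]
        rw [List.getD_eq_getElem?_getD, List.getElem?_append_left (by simp)]
        simp
    have hval : PySem.List.pyGetD nums (k : Int) 0
        + PySem.List.pyGetD ((List.range k).map (pvS nums) ++ List.replicate (nums.length - k) 0) ((k : Int) - 1) 0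
        = pvS nums k := by
      rw [h1, h2]
      cases k with
      | zero => simp [pvS, List.take_one]; cases nums with | nil => simp at hkn | cons a t => simp
      | succ j =>
        simp only [Nat.succ_ne_zero, if_false, Nat.succ_sub_one]
        have : pvS nums (j + 1) = pvS nums j + nums[j+1] := by
          simp [pvS, List.take_add_one, List.getElem?_eq_getElem hkn, List.sum_append]
          ring
        rw [this]; ring
    rw [hval, PySem.List.pySetD_natCast]
    have hrep : List.replicate (nums.length - k) (0:Int) = 0 :: List.replicate (nums.length - (k+1)) 0 := by
      have : nums.length - k = (nums.length - (k+1)) + 1 := by omega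
      rw [this, List.replicate_succ]
    rw [hrep]
    rw [List.set_append_right _ _ (by simp)]
    simp [List.range_succ]

-- The result loop of A: setting True under a condition in a False-initialised list.
theorem res_loop (c : Int → Prop) [DecidablePred c] (qn m : Nat) (hm : m ≤ qn) :
    (PySem.List.pyRange 0 (m : Int) 1).foldl
      (fun res i => if c i then PySem.List.pySetD res i true else res)
      (List.replicate qn false)
    = (List.range m).map (fun i : Nat => decide (c (i : Int))) ++ List.replicate (qn - m) false := by
  induction m with
  | zero => simp [PySem.List.pyRange_one_eq_nil]
  | succ k ih =>
    have hsplit : PySem.List.pyRange 0 ((k + 1 : Nat) : Int) 1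
        = PySem.List.pyRange 0 (k : Nat) 1 ++ [(k : Int)] := by
      push_cast
      exact PySem.List.pyRange_one_succ_right (by positivity)
    rw [hsplit, List.foldl_append, ih (by omega)]
    simp only [List.foldl_cons, List.foldl_nil]
    have hrep : List.replicate (qn - k) false = false :: List.replicate (qn - (k + 1)) false := by
      have h : qn - k = (qn - (k + 1)) + 1 := by omega
      rw [h, List.replicate_succ]
    by_cases hc : c (k : Int)
    · rw [if_pos hc, PySem.List.pySetD_natCast, hrep,
        List.set_append_right _ _ (by simp)]
      simp [List.range_succ, hc]
    · rw [if_neg hc, hrep, List.range_succ]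
      simp [hc]

-- Python indexing with a possibly negative in-range index is indexing at i % len.
theorem pyGetD_mod (xs : List Int) (i : Int) (d : Int)
    (h1 : -(xs.length : Int) ≤ i) (h2 : i < (xs.length : Int)) :
    PySem.List.pyGetD xs i d = xs.getD (i % (xs.length : Int)).toNat d := by
  rcases (show 0 ≤ i ∨ i < 0 by omega) with hi | hi
  · have hm : i % (xs.length : Int) = i := Int.emod_eq_of_lt hi h2
    rw [hm, show i = ((i.toNat : Nat) : Int) by omega, PySem.List.pyGetD_natCast]
    simp [max_eq_left hi]
  · set L : Int := (xs.length : Int) with hL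
    have hk0 : 0 < (-i).toNat := by omega
    have hkl : (-i).toNat ≤ xs.length := by omega
    have hieq : i = -(((-i).toNat : Nat) : Int) := by omega
    have hmod : i % L = i + L := by
      have e1 : (i + L * 1) % L = i % L := Int.add_mul_emod_self_left i L 1
      have e2 : (i + L) % L = i + L := Int.emod_eq_of_lt (by omega) (by omega)
      rw [← e2]; rw [mul_one] at e1; rw [e1]
    have hkey : ((-(((-i).toNat : Nat) : Int)) % L).toNat = xs.length - (-i).toNat := by
      rw [← hieq, hmod]; omega
    rw [hieq, PySem.List.pyGetD_neg_natCast _ _ _ hk0 hkl]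
    rw [hkey, List.getD_eq_getElem?_getD, List.getElem?_eq_getElem (by omega)]
    rfl

-- Python's prefix slice nums[:i] with an in-range (possibly negative) bound is take (i % len).
theorem slice_to_mod (xs : List Int) (i : Int)
    (h1 : -(xs.length : Int) ≤ i) (h2 : i < (xs.length : Int)) :
    PySem.List.slice xs none (some i) = xs.take (i % (xs.length : Int)).toNat := by
  rcases (show 0 ≤ i ∨ i < 0 by omega) with hi | hi
  · have hm : i % (xs.length : Int) = i := Int.emod_eq_of_lt hi h2
    rw [hm, show i = ((i.toNat : Nat) : Int) by omega, PySem.List.slice_to_natCast]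
    congr 1
  · have hk0 : 0 < (-i).toNat := by omega
    have hieq : i = -(((-i).toNat : Nat) : Int) := by omega
    set L : Int := (xs.length : Int) with hL
    have hmod : i % L = i + L := by
      have e1 : (i + L * 1) % L = i % L := Int.add_mul_emod_self_left i L 1
      have e2 : (i + L) % L = i + L := Int.emod_eq_of_lt (by omega) (by omega)
      rw [← e2]; rw [mul_one] at e1; rw [e1]
    rw [hieq, PySem.List.slice_to_neg_natCast _ _ hk0]
    rw [← hieq, hmod]
    congr 1
    omega

-- ===== VERDICT =====
theorem answer_spec : Claim_equal_answer := by
  intro nums queries limit _hdom hpre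
  unfold Spec_answer answer answer_alt
  simp only []
  rw [answer_prefix_loop nums nums.length le_rfl, Nat.sub_self, List.replicate_zero,
    List.append_nil]
  rw [res_loop (fun i =>
      PySem.List.pyGetD ((List.range nums.length).map (pvS nums))
          (PySem.List.pyGetD (PySem.List.pyGetD queries i []) 1 0) 0
        - PySem.List.pyGetD ((List.range nums.length).map (pvS nums))
            (PySem.List.pyGetD (PySem.List.pyGetD queries i []) 0 0) 0
        + PySem.List.pyGetD nums (PySem.List.pyGetD (PySem.List.pyGetD queries i []) 0 0) 0
        < limit) queries.length queries.length le_rfl]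
  rw [Nat.sub_self, List.replicate_zero, List.append_nil]
  apply List.ext_getElem (by simp)
  intro i hi1 hi2
  have hiq : i < queries.length := by simpa using hi1
  simp only [List.getElem_map, List.getElem_range]
  have hq : PySem.List.pyGetD queries ((i : Nat) : Int) [] = queries[i] := by
    rw [PySem.List.pyGetD_natCast, List.getD_eq_getElem?_getD, List.getElem?_eq_getElem hiq]
    rfl
  obtain ⟨hlen2, h0lo, h0hi, h1lo, h1hi⟩ := hpre queries[i] (List.getElem_mem hiq)
  have h0 : PySem.List.pyGetD queries[i] 0 0 = queries[i].getD 0 0 := PySem.List.pyGetD_zero _ _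
  have h1 : PySem.List.pyGetD queries[i] 1 0 = queries[i].getD 1 0 := by
    rw [show (1 : Int) = ((1 : Nat) : Int) by norm_num, PySem.List.pyGetD_natCast]
  set i0 : Int := queries[i].getD 0 0 with hi0def
  set i1 : Int := queries[i].getD 1 0 with hi1def
  have hn : 0 < nums.length := by omega
  set L : Int := (nums.length : Int) with hLdef
  set a : Nat := (i0 % L).toNat with hadef
  set b : Nat := (i1 % L).toNat with hbdef
  have ha0 : 0 ≤ i0 % L := Int.emod_nonneg _ (by omega)
  have hb0 : 0 ≤ i1 % L := Int.emod_nonneg _ (by omega)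
  have han : a < nums.length := by
    have := Int.emod_lt_of_pos i0 (b := L) (by omega); omega
  have hbn : b < nums.length := by
    have := Int.emod_lt_of_pos i1 (b := L) (by omega); omega
  have hPlen : ((List.range nums.length).map (pvS nums)).length = nums.length := by simp
  have hgP0 : PySem.List.pyGetD ((List.range nums.length).map (pvS nums)) i0 0 = pvS nums a := by
    rw [pyGetD_mod _ _ _ (by rw [hPlen]; omega) (by rw [hPlen]; omega), hPlen]
    rw [List.getD_eq_getElem?_getD, List.getElem?_eq_getElem (by simpa using han)]
    simp only [List.getElem_map, List.getElem_range, Option.getD_some]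
    rw [← hLdef, ← hadef]
  have hgP1 : PySem.List.pyGetD ((List.range nums.length).map (pvS nums)) i1 0 = pvS nums b := by
    rw [pyGetD_mod _ _ _ (by rw [hPlen]; omega) (by rw [hPlen]; omega), hPlen]
    rw [List.getD_eq_getElem?_getD, List.getElem?_eq_getElem (by simpa using hbn)]
    simp only [List.getElem_map, List.getElem_range, Option.getD_some]
    rw [← hLdef, ← hbdef]
  have hgN : PySem.List.pyGetD nums i0 0 = nums[a] := by
    rw [pyGetD_mod _ _ _ (by omega) (by omega)]
    rw [List.getD_eq_getElem?_getD, List.getElem?_eq_getElem han]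
    rfl
  have hsplitS : ∀ (j : Nat) (hj : j < nums.length), (nums.take j).sum + nums[j]'hj = pvS nums j := by
    intro j hj
    have htake : nums.take (j + 1) = nums.take j ++ [nums[j]] := by
      rw [List.take_add_one, List.getElem?_eq_getElem hj]
      rfl
    show _ = (nums.take (j + 1)).sum
    rw [htake, List.sum_append, List.sum_cons, List.sum_nil, add_zero]
  have hgN1 : PySem.List.pyGetD nums i1 0 = nums[b] := by
    rw [pyGetD_mod _ _ _ (by omega) (by omega)]
    rw [List.getD_eq_getElem?_getD, List.getElem?_eq_getElem hbn]
    rfl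
  have hPS0 : prefixSum nums i0 = pvS nums a := by
    unfold prefixSum
    rw [slice_to_mod nums i0 (by omega) (by omega), hgN]
    exact hsplitS a han
  have hPS1 : prefixSum nums i1 = pvS nums b := by
    unfold prefixSum
    rw [slice_to_mod nums i1 (by omega) (by omega), hgN1]
    exact hsplitS b hbn
  rw [hq, h0, h1, hgP0, hgP1, hgN, hPS0, hPS1]
  have := hsplitS a han
  simp only [decide_eq_decide]
  omega
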